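-- pv_equiv track=rewrite | github.com/donghyun-daniel/Tridge_Assignment | Base_Converter.py | _convert
-- ===== SOURCE A (Python) =====
-- def _convert(number, fromdigits, todigits):
--     if fromdigits == todigits: # don't have to convert
--         return number
--     else:
--         fromdigits_len, todigits_len = len(fromdigits), len(todigits)
--         number = str(number)
--         number_len = len(number)
--
--         # get temp_decimal_val
--         tmp_dec = 0
--         for idx, n in enumerate(number):
--             tmp = fromdigits_len**(number_len-idx-1) * fromdigits.index(n)
--             tmp_dec += tmp
--
--         # get todigits_val from decimal_val
--         result = ''
--         while tmp_dec > 0: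
--             tmp_dec, mod = divmod(tmp_dec, todigits_len)
--             result += str(todigits[mod])
--         return result[::-1]
-- ===== SOURCE B (Python) =====
-- def _convert(number, fromdigits, todigits):
--     if fromdigits == todigits:  # don't have to convert
--         return number
--     number = str(number)
--     fb, tb = len(fromdigits), len(todigits)
--     # schoolbook multiply-add kept entirely in the TARGET base: the value is never
--     # materialised as one big integer; `digs` holds target-base digit indices,
--     # least-significant first.
--     digs = []
--     for ch in number:
--         carry = fromdigits.index(ch)
--         for i in range(len(digs)):
--             carry += digs[i] * fb
--             digs[i] = carry % tb
--             carry //= tb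
--         while carry > 0:
--             digs.append(carry % tb)
--             carry //= tb
--     return ''.join(todigits[d] for d in reversed(digs))
-- ===== Notes on version B (the rewrite author's own statement) =====
-- stated objective: alternative
-- what changed: Instead of A's two staged passes (accumulate one big decimal integer with per-digit powers fromdigits_len**k and repeated .index scans, then a divmod emission loop), B performs schoolbook multiply-add directly in the target base on a list of small digit indices, so no big integer value is ever materialised and there is no final divmod loop.
import Mathlib
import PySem

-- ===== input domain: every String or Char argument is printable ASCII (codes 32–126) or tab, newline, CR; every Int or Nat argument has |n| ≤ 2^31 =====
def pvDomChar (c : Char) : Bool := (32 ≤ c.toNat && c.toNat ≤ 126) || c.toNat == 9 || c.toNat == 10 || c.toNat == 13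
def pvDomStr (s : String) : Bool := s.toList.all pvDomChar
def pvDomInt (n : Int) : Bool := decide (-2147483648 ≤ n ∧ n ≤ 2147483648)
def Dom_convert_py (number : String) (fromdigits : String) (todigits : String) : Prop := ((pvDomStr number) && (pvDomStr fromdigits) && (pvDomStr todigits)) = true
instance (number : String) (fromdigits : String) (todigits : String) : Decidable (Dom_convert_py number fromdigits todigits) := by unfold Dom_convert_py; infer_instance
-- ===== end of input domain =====

-- B converts by schoolbook multiply-add carried out directly in the TARGET base on a list of
-- small digit indices: the value is never materialised as one big integer and there is no
-- final divmod emission loop (objective: alternative algorithm / data structure).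

-- ===== PORT A =====
-- while tmp_dec > 0: tmp_dec, mod = divmod(tmp_dec, todigits_len); result += str(todigits[mod])
-- Fuel-bounded recursion: fuel = tmp_dec.toNat steps always suffice when 2 ≤ todigits_len
-- (the only case Pre_ admits with a positive value); the fuel guard only makes the loop total.
def pvDivLoopA (td : List Char) (tl : Int) : Nat → Int → List Char → List Char
  | 0, _, res => res
  | fuel + 1, t, res =>
    if 0 < t then
      pvDivLoopA td tl fuel (PySem.Int.floordiv t tl)
        (res ++ [(PySem.List.pyGet? td (PySem.Int.mod t tl)).getD ' '])
    else res

def convert_py (number : String) (fromdigits : String) (todigits : String) : String :=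
  if fromdigits = todigits then number
  else
    let fd := fromdigits.toList
    let td := todigits.toList
    let fromdigits_len : Int := fd.length
    let todigits_len : Int := td.length
    let num := number.toList
    let number_len := num.length
    -- tmp_dec = Σ fromdigits_len**(number_len-idx-1) * fromdigits.index(n)
    let tmp_dec : Int := (PySem.List.enumerate num 0).foldl
      (fun acc p => acc + fromdigits_len ^ (number_len - p.1.toNat - 1) *
        (((PySem.List.index? fd p.2).getD 0 : Nat) : Int)) 0
    -- result built left-to-right, then result[::-1]
    String.ofList ((pvDivLoopA td todigits_len tmp_dec.toNat tmp_dec []).reverse)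

-- ===== PORT B =====
-- while carry > 0: digs.append(todigit index carry % tb); carry //= tb
-- (fuel = carry.toNat always suffices when 2 ≤ tb, the only case Pre_ admits with a
-- positive carry; the fuel guard only makes the while-loop total)
def pvCarryLoopB (tb : Int) : Nat → Int → List Int
  | 0, _ => []
  | fuel + 1, c =>
    if 0 < c then PySem.Int.mod c tb :: pvCarryLoopB tb fuel (PySem.Int.floordiv c tb)
    else []

-- for i in range(len(digs)): carry += digs[i]*fb; digs[i] = carry % tb; carry //= tb
-- then the trailing while-loop appends the remaining carry digits
def pvStepB (fb tb : Int) : List Int → Int → List Int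
  | [], carry => pvCarryLoopB tb carry.toNat carry
  | d :: ds, carry =>
    PySem.Int.mod (carry + d * fb) tb ::
      pvStepB fb tb ds (PySem.Int.floordiv (carry + d * fb) tb)

def convert_py_alt (number : String) (fromdigits : String) (todigits : String) : String :=
  if fromdigits = todigits then number
  else
    let fd := fromdigits.toList
    let td := todigits.toList
    let fb : Int := fd.length
    let tb : Int := td.length
    -- digs = []; for ch in number: <multiply-add pass over digs with carry = fromdigits.index(ch)>
    let digs : List Int := number.toList.foldl
      (fun digs ch => pvStepB fb tb digs (((PySem.List.index? fd ch).getD 0 : Nat) : Int)) []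
    -- ''.join(todigits[d] for d in reversed(digs))
    String.ofList (digs.reverse.map (fun d => (PySem.List.pyGet? td d).getD ' '))

-- ===== PRECONDITION & SPEC =====
-- Pre_ admits exactly the inputs where Python A returns: otherwise A raises ValueError (a char of
-- number missing from fromdigits), raises ZeroDivisionError (todigits = "" with a positive value),
-- or loops forever (len(todigits) = 1 with a positive value; the value is 0 iff every char of
-- number is fromdigits' first character).
def Pre_convert_py (number : String) (fromdigits : String) (todigits : String) : Prop :=
  fromdigits = todigits ∨
    ((number.toList.all (fun c => fromdigits.toList.contains c)) = true ∧
      (2 ≤ todigits.toList.length ∨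
        (number.toList.all (fun c => fromdigits.toList.head? == some c)) = true))
instance (number : String) (fromdigits : String) (todigits : String) : Decidable (Pre_convert_py number fromdigits todigits) := by unfold Pre_convert_py; infer_instance

def pvWitness_convert_py : String × String × String := ("10", "01", "23")

def Spec_convert_py (number : String) (fromdigits : String) (todigits : String) (out : String) : Prop := out = convert_py_alt number fromdigits todigits
instance (number : String) (fromdigits : String) (todigits : String) (out : String) : Decidable (Spec_convert_py number fromdigits todigits out) := by unfold Spec_convert_py; infer_instance

-- ===== CLAIM (what is proved, stated in full; the proofs are below) =====
def Claim_equal_convert_py : Prop := ∀ (number : String) (fromdigits : String) (todigits : String), Dom_convert_py number fromdigits todigits → Pre_convert_py number fromdigits todigits → Spec_convert_py number fromdigits todigits (convert_py number fromdigits todigits)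

-- ===== LEMMAS AND PROOFS =====

-- canonical base-tb representation, least-significant digit first (= B's carry loop run to completion)
def pvRep (tb c : Int) : List Int := pvCarryLoopB tb c.toNat c

theorem pvDivShrink (tb c : Int) (htb : 2 ≤ tb) (hc : 0 < c) :
    0 ≤ PySem.Int.floordiv c tb ∧ (PySem.Int.floordiv c tb).toNat < c.toNat := by
  rw [PySem.Int.floordiv_eq_ediv_of_pos (by omega)]
  have h1 : 0 ≤ c / tb := Int.ediv_nonneg (by omega) (by omega)
  have h2 : c / tb < c := by
    apply Int.ediv_lt_of_lt_mul (by omega)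
    nlinarith
  exact ⟨h1, by omega⟩

-- the carry loop does not depend on the fuel once the fuel covers the value
theorem pvCarry_fuel (tb : Int) (htb : 2 ≤ tb) :
    ∀ (f g : Nat) (c : Int), c.toNat ≤ f → c.toNat ≤ g →
      pvCarryLoopB tb f c = pvCarryLoopB tb g c := by
  intro f
  induction f with
  | zero =>
    intro g c hf _
    have hc : ¬ 0 < c := by omega
    cases g with
    | zero => rfl
    | succ h => simp [pvCarryLoopB, hc]
  | succ f ih =>
    intro g c hf hg
    by_cases hc : 0 < c
    · cases g with
      | zero => omega
      | succ h =>
        obtain ⟨hd0, hdlt⟩ := pvDivShrink tb c htb hc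
        simp only [pvCarryLoopB, hc, if_true]
        rw [ih h _ (by omega) (by omega)]
    · cases g with
      | zero => simp [pvCarryLoopB, hc]
      | succ h => simp [pvCarryLoopB, hc]

theorem pvRep_pos (tb c : Int) (htb : 2 ≤ tb) (hc : 0 < c) :
    pvRep tb c = PySem.Int.mod c tb :: pvRep tb (PySem.Int.floordiv c tb) := by
  obtain ⟨hd0, hdlt⟩ := pvDivShrink tb c htb hc
  obtain ⟨k, hk⟩ : ∃ k, c.toNat = k + 1 := ⟨c.toNat - 1, by omega⟩
  unfold pvRep
  rw [hk]
  simp only [pvCarryLoopB, hc, if_true]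
  rw [pvCarry_fuel tb htb k (PySem.Int.floordiv c tb).toNat _ (by omega) (le_refl _)]

-- A's divmod emission loop is the carry loop, mapped to characters
theorem pvLoopA_eq (td : List Char) (tl : Int) :
    ∀ (fuel : Nat) (t : Int) (res : List Char),
      pvDivLoopA td tl fuel t res
        = res ++ (pvCarryLoopB tl fuel t).map
            (fun m => (PySem.List.pyGet? td m).getD ' ') := by
  intro fuel
  induction fuel with
  | zero => intro t res; simp [pvDivLoopA, pvCarryLoopB]
  | succ f ih =>
    intro t res
    by_cases ht : 0 < t
    · simp only [pvDivLoopA, pvCarryLoopB, ht, if_true, ih, List.map_cons]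
      simp
    · simp [pvDivLoopA, pvCarryLoopB, ht]

-- one multiply-add pass over the canonical representation of w produces the
-- canonical representation of w * fb + carry
theorem pvStep_rep (fb tb : Int) (hfb : 1 ≤ fb) (htb : 2 ≤ tb) :
    ∀ (n : Nat) (w c : Int), w.toNat = n → 0 ≤ w → 0 ≤ c →
      pvStepB fb tb (pvRep tb w) c = pvRep tb (w * fb + c) := by
  intro n
  induction n using Nat.strong_induction_on with
  | _ n ih =>
    intro w c hn hw hc
    by_cases hwpos : 0 < w
    · obtain ⟨hd0, hdlt⟩ := pvDivShrink tb w htb hwpos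
      have hm0 : 0 ≤ PySem.Int.mod w tb := PySem.Int.mod_nonneg w (by omega)
      rw [pvRep_pos tb w htb hwpos]
      simp only [pvStepB]
      have hc1 : (0:Int) ≤ c + PySem.Int.mod w tb * fb := by positivity
      obtain ⟨hq0, _⟩ :=
        pvDivShrink tb (c + PySem.Int.mod w tb * fb + tb) htb (by omega)
      have hq0' : 0 ≤ PySem.Int.floordiv (c + PySem.Int.mod w tb * fb) tb := by
        rw [PySem.Int.floordiv_eq_ediv_of_pos (by omega)]
        exact Int.ediv_nonneg hc1 (by omega)
      rw [ih (PySem.Int.floordiv w tb).toNat (by omega) _ _ rfl hd0 hq0']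
      have hsum : 0 < w * fb + c := by nlinarith
      rw [pvRep_pos tb (w * fb + c) htb hsum]
      have hdecomp : w * fb + c
          = (c + PySem.Int.mod w tb * fb) + (PySem.Int.floordiv w tb * fb) * tb := by
        have := PySem.Int.floordiv_mul_add_mod w tb
        nlinarith [this]
      congr 1
      · -- the emitted digit
        rw [hdecomp]
        simp only [PySem.Int.mod_eq_emod_of_pos (show (0:Int) < tb by omega)]
        simp
      · -- the recursive tail
        congr 1
        rw [hdecomp]
        simp only [PySem.Int.floordiv_eq_ediv_of_pos (show (0:Int) < tb by omega)]
        rw [Int.add_mul_ediv_right _ _ (show tb ≠ 0 by omega)]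
        ring
    · have hw0 : w = 0 := by omega
      subst hw0
      simp only [pvRep, Int.toNat_zero, pvCarryLoopB, pvStepB, zero_mul, zero_add]

-- B's outer loop over the number keeps digs = canonical representation of the Horner value
theorem pvFold_rep (fb tb : Int) (hfb : 1 ≤ fb) (htb : 2 ≤ tb) (g : Char → Int)
    (hg : ∀ ch, 0 ≤ g ch) :
    ∀ (cs : List Char) (w : Int), 0 ≤ w →
      cs.foldl (fun digs ch => pvStepB fb tb digs (g ch)) (pvRep tb w)
        = pvRep tb (cs.foldl (fun v ch => v * fb + g ch) w) := by
  intro cs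
  induction cs with
  | nil => intro w _; rfl
  | cons c cs ih =>
    intro w hw
    simp only [List.foldl_cons]
    rw [pvStep_rep fb tb hfb htb w.toNat w (g c) rfl hw (hg c)]
    exact ih (w * fb + g c) (by have := hg c; positivity)

theorem pvHorner_zero (fb : Int) (g : Char → Int) :
    ∀ (cs : List Char), (∀ c ∈ cs, g c = 0) →
      cs.foldl (fun v ch => v * fb + g ch) 0 = 0 := by
  intro cs
  induction cs with
  | nil => intro _; rfl
  | cons c cs ih =>
    intro h
    simp only [List.foldl_cons, h c (by simp), zero_mul, add_zero]
    exact ih (fun x hx => h x (by simp [hx]))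

theorem pvFold_zero (fb tb : Int) (g : Char → Int) :
    ∀ (cs : List Char), (∀ c ∈ cs, g c = 0) →
      cs.foldl (fun digs ch => pvStepB fb tb digs (g ch)) [] = [] := by
  intro cs
  induction cs with
  | nil => intro _; rfl
  | cons c cs ih =>
    intro h
    simp only [List.foldl_cons, h c (by simp)]
    have hstep : pvStepB fb tb [] 0 = [] := rfl
    rw [hstep]
    exact ih (fun x hx => h x (by simp [hx]))

-- B's digit list, started empty, is the canonical representation of the Horner value
theorem pvB_eq (fd td num : List Char)
    (hcont : (num.all fun c => fd.contains c) = true) (htb : 2 ≤ td.length) :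
    num.foldl (fun digs ch => pvStepB (fd.length : Int) (td.length : Int) digs
        (((PySem.List.index? fd ch).getD 0 : Nat) : Int)) []
      = pvRep (td.length : Int) (num.foldl (fun v c => v * (fd.length : Int) +
          (((PySem.List.index? fd c).getD 0 : Nat) : Int)) 0) := by
  cases num with
  | nil => rfl
  | cons c cs =>
    have hcfd : c ∈ fd := by
      have := List.all_eq_true.1 hcont c (by simp)
      simpa using this
    have hfb : (1:Int) ≤ (fd.length : Int) := by
      cases fd with
      | nil => simp at hcfd
      | cons _ _ => simp
    have h0 : pvRep (td.length : Int) 0 = [] := rfl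
    rw [← h0]
    exact pvFold_rep (fd.length : Int) (td.length : Int) hfb (by exact_mod_cast htb)
      (fun ch => (((PySem.List.index? fd ch).getD 0 : Nat) : Int))
      (fun ch => Int.natCast_nonneg _) (c :: cs) 0 le_rfl

-- A's positional-power sum is B's Horner fold
theorem pvPowSum_eq_horner (b : Int) (g : Char → Int) (num : List Char) :
    ((PySem.List.enumerate num 0).map
        (fun p => b ^ (num.length - p.1.toNat - 1) * g p.2)).sum
      = num.foldl (fun v c => v * b + g c) 0 := by
  induction num using List.reverseRecOn with
  | nil => simp [PySem.List.enumerate]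
  | append_singleton xs c ih =>
    rw [PySem.List.enumerate_append, List.map_append, List.sum_append,
      List.foldl_append]
    have hlast :
        ((PySem.List.enumerate [c] (0 + (xs.length : Int))).map
            (fun p => b ^ ((xs ++ [c]).length - p.1.toNat - 1) * g p.2)).sum = g c := by
      simp [PySem.List.enumerate]
    rw [hlast]
    have hshift :
        ((PySem.List.enumerate xs 0).map
            (fun p => b ^ ((xs ++ [c]).length - p.1.toNat - 1) * g p.2)).sum
          = b * ((PySem.List.enumerate xs 0).map
              (fun p => b ^ (xs.length - p.1.toNat - 1) * g p.2)).sum := by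
      rw [← List.sum_map_mul_left]
      apply congrArg
      apply List.map_congr_left
      intro p hp
      rcases (PySem.List.mem_enumerate_iff xs 0 p).1 hp with ⟨k, hk, rfl⟩
      have h1 : ((0 : Int) + (k : Int)).toNat = k := by omega
      have h2 : (xs ++ [c]).length - k - 1 = (xs.length - k - 1) + 1 := by
        simp only [List.length_append, List.length_cons, List.length_nil]
        omega
      rw [h1, h2, pow_succ]
      ring
    rw [hshift, ih, List.foldl_cons, List.foldl_nil]
    ring

-- a digit equal to fromdigits' first character has index 0
theorem pvIdx_head (fd : List Char) (c : Char) (h : fd.head? = some c) :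
    PySem.List.index? fd c = some 0 := by
  cases fd with
  | nil => simp at h
  | cons x xs =>
    have hx : x = c := by simpa using h
    subst hx
    rw [PySem.List.index?_cons_self]

-- A's tmp_dec accumulation equals the Horner fold over the same digit values
theorem pvTmp_eq (fd : List Char) (num : List Char) :
    (PySem.List.enumerate num 0).foldl
        (fun acc p => acc + (fd.length : Int) ^ (num.length - p.1.toNat - 1) *
          (((PySem.List.index? fd p.2).getD 0 : Nat) : Int)) 0
      = num.foldl (fun v c => v * (fd.length : Int) +
          (((PySem.List.index? fd c).getD 0 : Nat) : Int)) 0 := by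
  rw [PySem.List.foldl_add, zero_add,
    pvPowSum_eq_horner ((fd.length : Int))
      (fun ch => (((PySem.List.index? fd ch).getD 0 : Nat) : Int)) num]

-- ===== VERDICT (by name: the statement is the Claim_ definition above) =====
theorem convert_py_spec : Claim_equal_convert_py := by
  intro number fromdigits todigits _ hpre
  unfold Spec_convert_py convert_py convert_py_alt
  by_cases h : fromdigits = todigits
  · simp [h]
  · simp only [h, if_false]
    rcases hpre with hfd | ⟨hcont, hcase⟩
    · exact absurd hfd h
    rw [pvTmp_eq fromdigits.toList number.toList]
    rcases hcase with htb | hzero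
    · -- main case: 2 ≤ len(todigits)
      rw [pvB_eq fromdigits.toList todigits.toList number.toList hcont htb,
        pvLoopA_eq todigits.toList (todigits.toList.length : Int) _ _ []]
      simp only [List.nil_append, pvRep, List.map_reverse]
    · -- degenerate case admitted by Pre_: every digit of number is fromdigits' first char
      have hgz : ∀ c ∈ number.toList,
          (((PySem.List.index? fromdigits.toList c).getD 0 : Nat) : Int) = 0 := by
        intro c hc
        rw [pvIdx_head fromdigits.toList c (by simpa using List.all_eq_true.1 hzero c hc)]
        rfl
      rw [pvFold_zero _ _ _ number.toList hgz,
        pvHorner_zero (fromdigits.toList.length : Int) _ number.toList hgz]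
      rfl
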